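-- pv_equiv track=rewrite | github.com/kzhangm02/neural-state-variables-v4 | sr_utils.py | rewrite
-- ===== SOURCE A (Python) =====
-- def rewrite(eq):
--     idx2str = {0: ')', 1: ') ** 2', 2: ') ** 3'}
--     stack, new_eq = [], ''
--     while len(eq) > 0:
--         if eq.startswith('square'):
--             stack.append(1)
--             new_eq += '('
--             eq = eq[7:]
--         elif eq.startswith('cube'):
--             stack.append(2)
--             new_eq += '('
--             eq = eq[5:]
--         elif eq[0] == '(':
--             stack.append(0)
--             new_eq += '('
--             eq = eq[1:]
--         elif eq[0] == ')':
--             pop = stack[-1]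
--             stack = stack[:-1]
--             new_eq += idx2str[pop]
--             eq = eq[1:]
--         else:
--             new_eq += eq[0]
--             eq = eq[1:]
--     return new_eq
-- ===== SOURCE B (Python) =====
-- def rewrite(eq):
--     closers = (')', ') ** 2', ') ** 3')
--     frames = []   # stack of (pending pieces of the enclosing group, closer index)
--     parts = []    # pieces of the current (innermost open) group
--     i, n = 0, len(eq)
--     while i < n:
--         if eq.startswith('square', i):
--             frames.append((parts, 1)); parts = []; i += 7
--         elif eq.startswith('cube', i):
--             frames.append((parts, 2)); parts = []; i += 5
--         else:
--             c = eq[i]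
--             if c == '(':
--                 frames.append((parts, 0)); parts = []
--             elif c == ')':
--                 inner = ''.join(parts)
--                 parts, k = frames.pop()
--                 parts.append('(' + inner + closers[k])
--             else:
--                 parts.append(c)
--             i += 1
--     while frames:   # groups left open at the end: emit their '(' with no closer
--         inner = ''.join(parts)
--         parts, _ = frames.pop()
--         parts.append('(' + inner)
--     return ''.join(parts)
-- ===== Notes on version B (the rewrite author's own statement) =====
-- stated objective: alternative
-- what changed: B builds the result hierarchically: a stack of frames (pending pieces of the enclosing group, closer index) assembled on each ')' and flushed at the end, with one final join, instead of A's flat int stack, repeated slicing of the remaining string (eq = eq[7:]) and string concatenation.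
import Mathlib
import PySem

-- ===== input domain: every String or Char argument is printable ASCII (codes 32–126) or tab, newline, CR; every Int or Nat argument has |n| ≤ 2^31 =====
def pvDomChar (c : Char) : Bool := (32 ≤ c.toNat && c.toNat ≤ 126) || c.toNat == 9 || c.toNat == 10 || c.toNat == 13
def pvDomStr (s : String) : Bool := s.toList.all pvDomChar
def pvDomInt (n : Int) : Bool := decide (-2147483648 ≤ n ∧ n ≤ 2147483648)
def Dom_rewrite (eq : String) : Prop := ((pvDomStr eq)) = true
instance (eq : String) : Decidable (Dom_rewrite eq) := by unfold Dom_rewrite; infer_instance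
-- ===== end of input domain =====

-- B assembles the output hierarchically from a stack of frames (pending pieces, closer index),
-- joined once at the end, instead of A's flat int stack with repeated slicing and concatenation.

-- ===== PORT A =====
-- idx2str = {0: ')', 1: ') ** 2', 2: ') ** 3'}
def idx2strA (p : Nat) : List Char :=
  if p = 0 then [')'] else if p = 1 then (") ** 2").toList else (") ** 3").toList

-- the while loop of A: state (eq, stack, new_eq); each step slices the front off eq.
-- fuel is only a structural totality guard (each step consumes ≥ 1 char, so eq.length suffices).
def loopA (fuel : Nat) (eq : List Char) (stack : List Nat) (acc : List Char) : List Char :=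
  match fuel, eq with
  | _, [] => acc
  | 0, _ => acc
  | fuel + 1, c :: rest =>
    if ("square").toList.isPrefixOf (c :: rest) then
      loopA fuel ((c :: rest).drop 7) (1 :: stack) (acc ++ ['('])
    else if ("cube").toList.isPrefixOf (c :: rest) then
      loopA fuel ((c :: rest).drop 5) (2 :: stack) (acc ++ ['('])
    else if c = '(' then
      loopA fuel rest (0 :: stack) (acc ++ ['('])
    else if c = ')' then
      match stack with
      | [] => acc            -- Python raises IndexError here (stack[-1] on empty); excluded by Pre_
      | p :: st' => loopA fuel rest st' (acc ++ idx2strA p)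
    else
      loopA fuel rest stack (acc ++ [c])

def rewrite (eq : String) : String := String.ofList (loopA eq.toList.length eq.toList [] [])

-- ===== PORT B =====
-- closers = (')', ') ** 2', ') ** 3')
def closersB (k : Nat) : List Char :=
  if k = 0 then [')'] else if k = 1 then (") ** 2").toList else (") ** 3").toList

-- B's main loop: frames is the stack of open groups (pending pieces of the enclosing group,
-- closer index), innermost at the head (Python appends/pops at the end of the list);
-- parts holds the pieces of the current group. fuel is only a totality guard.
def loopB (fuel : Nat) (s : List Char) (i : Nat)
    (frames : List (List (List Char) × Nat)) (parts : List (List Char)) :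
    List (List (List Char) × Nat) × List (List Char) :=
  match fuel with
  | 0 => (frames, parts)
  | fuel + 1 =>
    if i < s.length then
      if ("square").toList.isPrefixOf (s.drop i) then
        loopB fuel s (i + 7) ((parts, 1) :: frames) []
      else if ("cube").toList.isPrefixOf (s.drop i) then
        loopB fuel s (i + 5) ((parts, 2) :: frames) []
      else
        let c := s.getD i ' '
        if c = '(' then loopB fuel s (i + 1) ((parts, 0) :: frames) []
        else if c = ')' then
          match frames with
          | [] => (frames, parts)   -- Python raises IndexError here (pop of empty list); excluded by Pre_
          | (p, k) :: fs => loopB fuel s (i + 1) fs (p ++ [('(' :: (parts.flatten ++ closersB k))])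
        else loopB fuel s (i + 1) frames (parts ++ [[c]])
    else (frames, parts)

-- B's flush loop ('while frames: ...') followed by the final join.
def flushB : List (List (List Char) × Nat) → List (List Char) → List Char
  | [], parts => parts.flatten
  | (p, _) :: fs, parts => flushB fs (p ++ [('(' :: parts.flatten)])

def rewrite_alt (eq : String) : String :=
  String.ofList
    (flushB (loopB eq.toList.length eq.toList 0 [] []).1
            (loopB eq.toList.length eq.toList 0 [] []).2)

-- ===== PRECONDITION & SPEC =====
-- Pre_ excludes exactly the inputs on which Python A raises IndexError: a ')' reached with an
-- empty stack. It is a balancedness shape condition on the input (nesting depth never goes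
-- negative), stated as a char-by-char scan with a skip counter because 'square'/'cube' also
-- consume the character that follows them; it computes no output of either port.
def balA (l : List Char) (skip : Nat) (d : Nat) : Bool :=
  match l with
  | [] => true
  | c :: rest =>
    if 0 < skip then balA rest (skip - 1) d
    else if ("square").toList.isPrefixOf (c :: rest) then balA rest 6 (d + 1)
    else if ("cube").toList.isPrefixOf (c :: rest) then balA rest 4 (d + 1)
    else if c = '(' then balA rest 0 (d + 1)
    else if c = ')' then d ≠ 0 && balA rest 0 (d - 1)
    else balA rest 0 d

def Pre_rewrite (eq : String) : Prop := balA eq.toList 0 0 = true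
instance (eq : String) : Decidable (Pre_rewrite eq) := by unfold Pre_rewrite; infer_instance
def pvWitness_rewrite : String := "square(x + cube(y))"

def Spec_rewrite (eq : String) (out : String) : Prop := out = rewrite_alt eq
instance (eq : String) (out : String) : Decidable (Spec_rewrite eq out) := by unfold Spec_rewrite; infer_instance

-- ===== CLAIM (what is proved, stated in full; the proofs are below) =====
def Claim_equal_rewrite : Prop := ∀ (eq : String), Dom_rewrite eq → Pre_rewrite eq → Spec_rewrite eq (rewrite eq)

-- ===== LEMMAS AND PROOFS =====

lemma loopA_nil (fuel : Nat) (st : List Nat) (acc : List Char) : loopA fuel [] st acc = acc := by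
  cases fuel <;> rfl

lemma loopA_succ (fuel : Nat) (c : Char) (rest : List Char) (stack : List Nat) (acc : List Char) :
    loopA (fuel + 1) (c :: rest) stack acc =
      (if ("square").toList.isPrefixOf (c :: rest) then
        loopA fuel ((c :: rest).drop 7) (1 :: stack) (acc ++ ['('])
      else if ("cube").toList.isPrefixOf (c :: rest) then
        loopA fuel ((c :: rest).drop 5) (2 :: stack) (acc ++ ['('])
      else if c = '(' then
        loopA fuel rest (0 :: stack) (acc ++ ['('])
      else if c = ')' then
        match stack with
        | [] => acc
        | p :: st' => loopA fuel rest st' (acc ++ idx2strA p)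
      else
        loopA fuel rest stack (acc ++ [c])) := rfl

lemma loopB_succ (fuel : Nat) (s : List Char) (i : Nat)
    (frames : List (List (List Char) × Nat)) (parts : List (List Char)) :
    loopB (fuel + 1) s i frames parts =
      (if i < s.length then
        if ("square").toList.isPrefixOf (s.drop i) then
          loopB fuel s (i + 7) ((parts, 1) :: frames) []
        else if ("cube").toList.isPrefixOf (s.drop i) then
          loopB fuel s (i + 5) ((parts, 2) :: frames) []
        else
          let c := s.getD i ' '
          if c = '(' then loopB fuel s (i + 1) ((parts, 0) :: frames) []
          else if c = ')' then
            match frames with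
            | [] => (frames, parts)
            | (p, k) :: fs => loopB fuel s (i + 1) fs (p ++ [('(' :: (parts.flatten ++ closersB k))])
          else loopB fuel s (i + 1) frames (parts ++ [[c]])
      else (frames, parts)) := rfl

-- the flushed value is the enclosing groups' pieces, then '(' separators, then the current pieces
lemma flushB_acc (fs : List (List (List Char) × Nat)) :
    ∀ (parts : List (List Char)), flushB fs parts = flushB fs [] ++ parts.flatten := by
  induction fs with
  | nil => intro parts; simp [flushB]
  | cons f fs ih =>
    intro parts
    obtain ⟨p, k⟩ := f
    show flushB fs (p ++ [('(' :: parts.flatten)]) = flushB fs (p ++ [['(']]) ++ parts.flatten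
    rw [ih (p ++ [('(' :: parts.flatten)]), ih (p ++ [['(']])]
    simp

-- main invariant: flushing B's loop state yields exactly A's loop value, where A's int stack is
-- the frames' closer indices and A's accumulated string is the flushed current state.
lemma loopB_eq (s : List Char) : ∀ (fuel i : Nat) (frames : List (List (List Char) × Nat))
    (parts : List (List Char)), s.length - i ≤ fuel → ∀ (g : Nat), s.length - i ≤ g →
    flushB (loopB fuel s i frames parts).1 (loopB fuel s i frames parts).2 =
      loopA g (s.drop i) (frames.map Prod.snd) (flushB frames parts) := by
  intro fuel
  induction fuel with
  | zero =>
    intro i frames parts hk g hg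
    have hge : s.length ≤ i := by omega
    show flushB frames parts = _
    rw [List.drop_eq_nil_of_le hge, loopA_nil]
  | succ fuel ih =>
    intro i frames parts hk g hg
    by_cases h : i < s.length
    · obtain ⟨g', rfl⟩ : ∃ g', g = g' + 1 := ⟨g - 1, by omega⟩
      have hcons : s.drop i = s[i] :: s.drop (i + 1) := List.drop_eq_getElem_cons h
      have hgetD : s.getD i ' ' = s[i] := List.getD_eq_getElem s ' ' h
      have hdd7 : List.drop 7 (List.drop i s) = List.drop (i + 7) s := by
        rw [List.drop_drop]
      have hdd5 : List.drop 5 (List.drop i s) = List.drop (i + 5) s := by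
        rw [List.drop_drop]
      rw [loopB_succ, if_pos h]
      conv_rhs => rw [hcons, loopA_succ]
      rw [← hcons]
      dsimp only
      rw [hgetD]
      split_ifs with h1 h2 h3 h4
      · rw [hdd7, ih (i + 7) _ _ (by omega) g' (by omega)]
        simp only [List.map_cons]
        congr 1
        show flushB frames (parts ++ [('(' :: List.flatten ([] : List (List Char)))]) =
          flushB frames parts ++ ['(']
        rw [flushB_acc frames (parts ++ [('(' :: List.flatten ([] : List (List Char)))]),
            flushB_acc frames parts]
        simp
      · rw [hdd5, ih (i + 5) _ _ (by omega) g' (by omega)]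
        simp only [List.map_cons]
        congr 1
        show flushB frames (parts ++ [('(' :: List.flatten ([] : List (List Char)))]) =
          flushB frames parts ++ ['(']
        rw [flushB_acc frames (parts ++ [('(' :: List.flatten ([] : List (List Char)))]),
            flushB_acc frames parts]
        simp
      · rw [ih (i + 1) _ _ (by omega) g' (by omega)]
        simp only [List.map_cons]
        congr 1
        show flushB frames (parts ++ [('(' :: List.flatten ([] : List (List Char)))]) =
          flushB frames parts ++ ['(']
        rw [flushB_acc frames (parts ++ [('(' :: List.flatten ([] : List (List Char)))]),
            flushB_acc frames parts]
        simp
      · match frames with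
        | [] => simp [flushB]
        | (p, k) :: fs =>
          dsimp only
          rw [ih (i + 1) _ _ (by omega) g' (by omega)]
          simp only [List.map_cons]
          congr 1
          show flushB fs (p ++ [('(' :: (parts.flatten ++ closersB k))]) =
            flushB fs (p ++ [('(' :: parts.flatten)]) ++ idx2strA k
          rw [flushB_acc fs (p ++ [('(' :: (parts.flatten ++ closersB k))]),
              flushB_acc fs (p ++ [('(' :: parts.flatten)])]
          simp [closersB, idx2strA]
      · rw [ih (i + 1) _ _ (by omega) g' (by omega)]
        congr 1
        rw [flushB_acc frames (parts ++ [[s[i]]]), flushB_acc frames parts]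
        simp
    · rw [loopB_succ, if_neg h]
      have hnil : s.drop i = [] := List.drop_eq_nil_of_le (by omega)
      show flushB frames parts = _
      rw [hnil, loopA_nil]

-- ===== VERDICT (by name: the statement is the Claim_ definition above) =====
theorem rewrite_spec : Claim_equal_rewrite := by
  intro eq _ _
  unfold Spec_rewrite rewrite rewrite_alt
  rw [loopB_eq eq.toList eq.toList.length 0 [] [] (by omega) eq.toList.length (by omega)]
  simp [flushB]
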